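-- pv_equiv track=rewrite | github.com/ayyubibrahimi/long-context-cj-eval | model/Vision/src/src.py | extract_officer_data
-- ===== SOURCE A (Python) =====
-- def extract_officer_data(response):
--     officers = []
--     current_officer = {}
--     for line in response.split('\n'):
--         if line.startswith("Officer Name:"):
--             if current_officer:
--                 officers.append(current_officer)
--                 current_officer = {}
--             current_officer["Officer Name"] = line.split(":", 1)[1].strip()
--         elif line.startswith("Officer Context:"):
--             current_officer["Officer Context"] = line.split(":", 1)[1].strip()
--         elif line.startswith("Officer Role:"):
--             current_officer["Officer Role"] = line.split(":", 1)[1].strip()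
--     if current_officer:
--         officers.append(current_officer)
--     return officers
-- ===== SOURCE B (Python) =====
-- _FIELDS = (("Officer Name:", "Officer Name"),
--            ("Officer Context:", "Officer Context"),
--            ("Officer Role:", "Officer Role"))
--
--
-- def _field(line):
--     for prefix, key in _FIELDS:
--         if line.startswith(prefix):
--             return key, line.split(":", 1)[1].strip()
--     return None
--
--
-- def extract_officer_data(response):
--     # Phase 1: segment the lines into blocks; each "Officer Name:" line starts
--     # a new block, lines before the first name form a leading block.
--     blocks = [[]]
--     for line in response.split('\n'):
--         if line.startswith("Officer Name:"):
--             blocks.append([])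
--         blocks[-1].append(line)
--     # Phase 2: parse each block independently; dict() keeps last value per key
--     # at the key's first position, like repeated assignment. Drop empty blocks.
--     result = []
--     for block in blocks:
--         d = dict(f for f in map(_field, block) if f is not None)
--         if d:
--             result.append(d)
--     return result
-- ===== Notes on version B (the rewrite author's own statement) =====
-- stated objective: alternative
-- what changed: A threads one mutable (officers, current_officer) state through a single pass; B first segments the lines into blocks (each 'Officer Name:' line starts a new block, with a leading block for lines before the first name) and then parses each block independently into a dict, keeping non-empty ones.
import Mathlib
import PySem

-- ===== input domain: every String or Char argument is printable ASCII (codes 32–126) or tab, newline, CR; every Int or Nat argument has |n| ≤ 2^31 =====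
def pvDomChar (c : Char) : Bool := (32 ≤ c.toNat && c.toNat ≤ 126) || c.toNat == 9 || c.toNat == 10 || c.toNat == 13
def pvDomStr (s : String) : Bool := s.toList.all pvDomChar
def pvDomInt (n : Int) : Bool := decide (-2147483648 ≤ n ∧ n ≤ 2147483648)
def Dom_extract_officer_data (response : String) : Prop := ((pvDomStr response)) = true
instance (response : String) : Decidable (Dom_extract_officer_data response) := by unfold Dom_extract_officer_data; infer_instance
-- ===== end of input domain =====

-- B re-decomposes A's single stateful pass as segment-into-blocks-then-parse-each-block (same results, alternative structure).


-- shared per-line primitive: line.split(":", 1)[1].strip()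
-- (the [1] is only evaluated under a startswith guard whose prefix contains ':', so the index always exists; getD "" is never taken)
def pvVal (line : String) : String :=
  PySem.Str.strip ((PySem.List.pyGet? ((PySem.Str.splitMax? line ":" 1).getD []) 1).getD "")

-- ===== PORT A =====
def pvStepA (st : List (PySem.Dict String String) × PySem.Dict String String) (line : String) :
    List (PySem.Dict String String) × PySem.Dict String String :=
  let officers := st.1
  let cur := st.2
  if PySem.Str.startswith line "Officer Name:" then
    let p := if cur.items.isEmpty then (officers, cur) else (officers ++ [cur], PySem.Dict.empty)
    (p.1, p.2.insert "Officer Name" (pvVal line))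
  else if PySem.Str.startswith line "Officer Context:" then
    (officers, cur.insert "Officer Context" (pvVal line))
  else if PySem.Str.startswith line "Officer Role:" then
    (officers, cur.insert "Officer Role" (pvVal line))
  else (officers, cur)

def extract_officer_data (response : String) : List (List (String × String)) :=
  let lines := (PySem.Str.split? response "\n").getD []   -- "\n" ≠ "", so split? is always some
  let st := lines.foldl pvStepA ([], PySem.Dict.empty)
  let officers := if st.2.items.isEmpty then st.1 else st.1 ++ [st.2]
  officers.map PySem.Dict.items

-- ===== PORT B =====
-- _field: Source B loops over the 3-literal tuple _FIELDS with startswith/return; unrolled as the same 3-way chain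
def pvField (line : String) : Option (String × String) :=
  if PySem.Str.startswith line "Officer Name:" then some ("Officer Name", pvVal line)
  else if PySem.Str.startswith line "Officer Context:" then some ("Officer Context", pvVal line)
  else if PySem.Str.startswith line "Officer Role:" then some ("Officer Role", pvVal line)
  else none

-- phase-1 step: blocks.append([]) on a name line, then blocks[-1].append(line)
def pvStepBlocks (bs : List (List String)) (line : String) : List (List String) :=
  let bs := if PySem.Str.startswith line "Officer Name:" then bs ++ [[]] else bs
  bs.dropLast ++ [(bs.getLastD []) ++ [line]]

-- dict(f for f in map(_field, block) if f is not None)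
def pvParseBlock (block : List String) : PySem.Dict String String :=
  PySem.Dict.ofList (block.filterMap pvField)

def extract_officer_data_alt (response : String) : List (List (String × String)) :=
  let lines := (PySem.Str.split? response "\n").getD []
  let blocks := lines.foldl pvStepBlocks [[]]
  let result := blocks.foldl
    (fun res block =>
      let d := pvParseBlock block
      if d.items.isEmpty then res else res ++ [d]) []
  result.map PySem.Dict.items

-- ===== PRECONDITION & SPEC =====
def Spec_extract_officer_data (response : String) (out : List (List (String × String))) : Prop := out = extract_officer_data_alt response
instance (response : String) (out : List (List (String × String))) : Decidable (Spec_extract_officer_data response out) := by unfold Spec_extract_officer_data; infer_instance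

-- ===== CLAIM (what is proved, stated in full; the proofs are below) =====
def Claim_equal_extract_officer_data : Prop := ∀ (response : String), Dom_extract_officer_data response → Spec_extract_officer_data response (extract_officer_data response)

-- ===== LEMMAS AND PROOFS =====

-- the block decomposition of a line list, as a structural recursion (proof-only helper)
def pvSplitBlocks (b : List String) : List String → List (List String)
  | [] => [b]
  | l :: ls =>
    if PySem.Str.startswith l "Officer Name:" then b :: pvSplitBlocks [l] ls
    else pvSplitBlocks (b ++ [l]) ls



theorem pvSplitBlocks_cons (b : List String) (l : String) (ls : List String) :
    pvSplitBlocks b (l :: ls) =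
      (if PySem.Str.startswith l "Officer Name:" then b :: pvSplitBlocks [l] ls
       else pvSplitBlocks (b ++ [l]) ls) := rfl

theorem pvBlocksFold (ls : List String) : ∀ (pre : List (List String)) (b : List String),
    ls.foldl pvStepBlocks (pre ++ [b]) = pre ++ pvSplitBlocks b ls := by
  induction ls with
  | nil => intro pre b; simp [pvSplitBlocks]
  | cons l ls ih =>
    intro pre b
    rw [List.foldl_cons]
    by_cases h : PySem.Str.startswith l "Officer Name:"
    · have hstep : pvStepBlocks (pre ++ [b]) l = (pre ++ [b]) ++ [[l]] := by
        simp only [pvStepBlocks, h]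
        simp
      rw [hstep, ih (pre ++ [b]) [l], pvSplitBlocks_cons, if_pos h]
      simp
    · have hstep : pvStepBlocks (pre ++ [b]) l = pre ++ [b ++ [l]] := by
        simp only [pvStepBlocks, h]
        simp
      rw [hstep, ih pre (b ++ [l]), pvSplitBlocks_cons, if_neg h]

theorem pvParse_append (b : List String) (l : String) :
    pvParseBlock (b ++ [l]) =
      match pvField l with
      | none => pvParseBlock b
      | some kv => (pvParseBlock b).insert kv.1 kv.2 := by
  cases hf : pvField l with
  | none => simp [pvParseBlock, List.filterMap_append, hf, PySem.Dict.ofList]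
  | some kv =>
    simp [pvParseBlock, List.filterMap_append, hf, PySem.Dict.ofList, PySem.Dict.update,
      List.foldl_append]

theorem pvMain (ls : List String) : ∀ (offs : List (PySem.Dict String String)) (b : List String),
    (let st := ls.foldl pvStepA (offs, pvParseBlock b)
     if st.2.items.isEmpty then st.1 else st.1 ++ [st.2])
    = (pvSplitBlocks b ls).foldl
        (fun res block =>
          let d := pvParseBlock block
          if d.items.isEmpty then res else res ++ [d]) offs := by
  induction ls with
  | nil =>
    intro offs b
    simp only [List.foldl_nil, pvSplitBlocks, List.foldl_cons]
  | cons l ls ih =>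
    intro offs b
    by_cases hn : PySem.Str.startswith l "Officer Name:"
    · have hparse : pvParseBlock [l] = PySem.Dict.empty.insert "Officer Name" (pvVal l) := by
        simp only [pvParseBlock, pvField, hn, reduceIte, List.filterMap_cons, List.filterMap_nil,
          PySem.Dict.ofList, PySem.Dict.update, List.foldl_cons, List.foldl_nil]
      have hstep : pvStepA (offs, pvParseBlock b) l =
          ((if (pvParseBlock b).items.isEmpty then offs else offs ++ [pvParseBlock b]),
            pvParseBlock [l]) := by
        rw [hparse]
        simp only [pvStepA]
        rw [if_pos hn]
        by_cases he : (pvParseBlock b).items.isEmpty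
        · have hb0 : pvParseBlock b = PySem.Dict.empty := by
            apply PySem.Dict.ext
            simpa using he
          rw [if_pos he, if_pos he, hb0]
        · rw [if_neg he, if_neg he]
      rw [List.foldl_cons, hstep, pvSplitBlocks_cons, if_pos hn, List.foldl_cons]
      exact ih _ [l]
    · have hfield : pvStepA (offs, pvParseBlock b) l = (offs, pvParseBlock (b ++ [l])) := by
        rw [pvParse_append]
        simp only [pvStepA, pvField]
        rw [if_neg hn, if_neg hn]
        by_cases hc : PySem.Str.startswith l "Officer Context:"
        · rw [if_pos hc, if_pos hc]
        · rw [if_neg hc, if_neg hc]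
          by_cases hr : PySem.Str.startswith l "Officer Role:"
          · rw [if_pos hr, if_pos hr]
          · rw [if_neg hr, if_neg hr]
      rw [List.foldl_cons, hfield, pvSplitBlocks_cons, if_neg hn]
      exact ih _ (b ++ [l])

-- ===== VERDICT (by name: the statement is the Claim_ definition above) =====
theorem extract_officer_data_spec : Claim_equal_extract_officer_data := by
  intro response _
  unfold Spec_extract_officer_data extract_officer_data extract_officer_data_alt
  have hempty : pvParseBlock [] = PySem.Dict.empty := by
    simp [pvParseBlock, PySem.Dict.ofList, PySem.Dict.update]
  have hmain := pvMain ((PySem.Str.split? response "\n").getD []) [] []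
  rw [hempty] at hmain
  have hblocks := pvBlocksFold ((PySem.Str.split? response "\n").getD []) [] []
  simp only [List.nil_append] at hmain hblocks
  simp only [hblocks]
  rw [← hmain]
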